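-- pv_equiv track=rewrite | github.com/ajhamdi/AdvPC | cluster_exp_soft.py | generate_soft_setup
-- ===== SOURCE A (Python) =====
-- def generate_soft_setup(cluster_nb=0):
--     cluster_setup = []
--     networks_list = ["PN", "PN1", "PN2", "GCN"]
--     iterations_list = [500, 500, 500, 700]
--     for network, iteration in zip(networks_list, iterations_list):
--         for ii in [(1, 0, 0), (0, 1, 0), (0, 0, 1)]:
--             beta_cham = ii[0]
--             beta_two = ii[1]
--             beta_emd = ii[2]
--             cluster_setup.append(
--                 (network, beta_cham, beta_two, beta_emd, iteration))
--     return cluster_setup[cluster_nb]  # len(cluster_setup) = 160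
-- ===== SOURCE B (Python) =====
-- def generate_soft_setup(cluster_nb=0):
--     networks_list = ["PN", "PN1", "PN2", "GCN"]
--     iterations_list = [500, 500, 500, 700]
--     betas = [(1, 0, 0), (0, 1, 0), (0, 0, 1)]
--     net_idx, beta_idx = divmod(cluster_nb, 3)
--     beta = betas[beta_idx]
--     return (networks_list[net_idx], beta[0], beta[1], beta[2],
--             iterations_list[net_idx])
-- ===== Notes on version B (the rewrite author's own statement) =====
-- stated objective: simpler
-- what changed: Replaces building the 12-entry table with a nested loop and indexing into it by a closed-form divmod(cluster_nb, 3) lookup into the three constant lists.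
import Mathlib
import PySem

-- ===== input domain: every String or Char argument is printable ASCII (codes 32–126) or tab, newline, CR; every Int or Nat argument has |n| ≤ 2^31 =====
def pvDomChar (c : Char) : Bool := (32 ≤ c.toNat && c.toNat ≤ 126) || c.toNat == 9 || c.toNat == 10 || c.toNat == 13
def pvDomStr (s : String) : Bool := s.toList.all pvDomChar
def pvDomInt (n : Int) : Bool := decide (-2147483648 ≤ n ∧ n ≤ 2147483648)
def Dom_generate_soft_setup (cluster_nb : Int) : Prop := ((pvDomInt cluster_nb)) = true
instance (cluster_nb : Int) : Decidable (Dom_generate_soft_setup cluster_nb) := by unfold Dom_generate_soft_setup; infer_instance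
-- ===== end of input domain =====

-- B replaces A's table build + index with a closed-form divmod lookup into the constant lists (simpler).
-- ===== PORT A =====
-- the nested loop building cluster_setup, as a fold over zip(networks_list, iterations_list)
def pvTableA : List (String × Int × Int × Int × Int) :=
  (List.zip ["PN", "PN1", "PN2", "GCN"] ([500, 500, 500, 700] : List Int)).foldl
    (fun acc ni =>
      ([(1, 0, 0), (0, 1, 0), (0, 0, 1)] : List (Int × Int × Int)).foldl
        (fun acc2 ii => acc2 ++ [(ni.1, ii.1, ii.2.1, ii.2.2, ni.2)]) acc) []

def generate_soft_setup (cluster_nb : Int) : String × Int × Int × Int × Int :=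
  (PySem.List.pyGet? pvTableA cluster_nb).getD ("", 0, 0, 0, 0)  -- none (IndexError) excluded by Pre_

-- ===== PORT B =====
def generate_soft_setup_alt (cluster_nb : Int) : String × Int × Int × Int × Int :=
  let net_idx := PySem.Int.floordiv cluster_nb 3
  let beta_idx := PySem.Int.mod cluster_nb 3
  let beta := (PySem.List.pyGet? ([(1, 0, 0), (0, 1, 0), (0, 0, 1)] : List (Int × Int × Int)) beta_idx).getD (0, 0, 0)
  ((PySem.List.pyGet? ["PN", "PN1", "PN2", "GCN"] net_idx).getD "",
    beta.1, beta.2.1, beta.2.2,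
    (PySem.List.pyGet? ([500, 500, 500, 700] : List Int) net_idx).getD 0)

-- ===== PRECONDITION & SPEC =====
-- Pre_ excludes exactly the cluster_nb on which A's list index raises IndexError.
def Pre_generate_soft_setup (cluster_nb : Int) : Prop := -12 ≤ cluster_nb ∧ cluster_nb < 12
instance (cluster_nb : Int) : Decidable (Pre_generate_soft_setup cluster_nb) := by unfold Pre_generate_soft_setup; infer_instance
def pvWitness_generate_soft_setup : Int := 5
def Spec_generate_soft_setup (cluster_nb : Int) (out : String × Int × Int × Int × Int) : Prop := out = generate_soft_setup_alt cluster_nb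
instance (cluster_nb : Int) (out : String × Int × Int × Int × Int) : Decidable (Spec_generate_soft_setup cluster_nb out) := by unfold Spec_generate_soft_setup; infer_instance

-- ===== CLAIM (what is proved, stated in full; the proofs are below) =====
def Claim_equal_generate_soft_setup : Prop := ∀ (cluster_nb : Int), Dom_generate_soft_setup cluster_nb → Pre_generate_soft_setup cluster_nb → Spec_generate_soft_setup cluster_nb (generate_soft_setup cluster_nb)

-- ===== LEMMAS AND PROOFS =====

-- ===== VERDICT (by name: the statement is the Claim_ definition above) =====
theorem generate_soft_setup_spec : Claim_equal_generate_soft_setup := by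
  intro n _ hpre
  obtain ⟨h1, h2⟩ := hpre
  unfold Spec_generate_soft_setup
  interval_cases n <;> decide
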